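-- pv_equiv track=rewrite | github.com/ggzor/competitive-programming | Kattis/fruitbaskets.py | solve
-- ===== SOURCE A (Python) =====
-- def solve(fs):
--     memo = [None] * len(fs)
--     for i in range(len(fs) - 1, -1, -1):
--         x = fs[i]
--         acc = x if x >= 200 else 0
--         scount = 1 if x >= 200 else 0
--         l = [] if x >= 200 else [x]
--
--         for j in range(i + 1, len(fs)):
--             for y in memo[j][1]:
--                 v = x + y
--                 if v >= 200:
--                     acc += v
--                     scount += 1
--                 else:
--                     l.append(v)
--
--         if i + 1 < len(fs):
--             if memo[i + 1][0] > 0: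
--                 acc += 2 * memo[i + 1][0] + x * memo[i + 1][2]
--                 scount += 2 * memo[i + 1][2]
--
--         memo[i] = (acc, l, scount)
--
--     return memo[0][0]
-- ===== SOURCE B (Python) =====
-- def solve(fs):
--     # One right-to-left pass over fs aggregating subsets by their sum in a counter,
--     # instead of A's memo array of per-index lists of every individual small subset sum.
--     acc = 0      # total of the sums of subsets already classified as >= 200
--     bcount = 0   # how many such subsets
--     cnt = {}     # small sum -> number of still-small (every suffix-sum < 200) subsets with that sum
--     for x in reversed(fs):
--         if acc > 0:
--             nacc = 2 * acc + x * bcount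
--             nbcount = 2 * bcount
--         else:
--             # A's recurrence keeps earlier classified subsets only while their total is positive
--             nacc = 0
--             nbcount = 0
--         ncnt = dict(cnt)
--         for s, c in cnt.items():
--             t = x + s
--             if t >= 200:
--                 nacc += t * c
--                 nbcount += c
--             else:
--                 ncnt[t] = ncnt.get(t, 0) + c
--         if x >= 200:
--             nacc += x
--             nbcount += 1
--         else:
--             ncnt[x] = ncnt.get(x, 0) + 1
--         acc, bcount, cnt = nacc, nbcount, ncnt
--     return acc
-- ===== Notes on version B (the rewrite author's own statement) =====
-- stated objective: alternative
-- what changed: Replaces A's memo array of per-index lists holding every individual small subset sum (re-scanned by nested loops) with one right-to-left pass over a dict that counts still-small subsets by their sum, so duplicate sums collapse into one counter entry.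
import Mathlib
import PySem

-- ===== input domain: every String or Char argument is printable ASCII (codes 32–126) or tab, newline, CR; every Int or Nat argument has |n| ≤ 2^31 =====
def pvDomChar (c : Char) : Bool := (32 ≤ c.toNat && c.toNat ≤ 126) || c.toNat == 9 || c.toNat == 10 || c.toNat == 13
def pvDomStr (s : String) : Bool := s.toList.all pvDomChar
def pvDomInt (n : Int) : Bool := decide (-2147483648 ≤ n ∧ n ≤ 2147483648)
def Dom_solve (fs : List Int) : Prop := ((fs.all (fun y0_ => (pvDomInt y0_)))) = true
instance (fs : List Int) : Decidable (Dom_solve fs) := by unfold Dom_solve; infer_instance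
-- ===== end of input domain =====

-- B replaces A's memo array of per-index lists holding every individual small subset sum
-- (re-scanned by nested loops) with a single right-to-left pass keeping one counter that
-- aggregates still-small subsets by their sum (objective: alternative).

-- ===== PORT A =====
-- state of A's inner double loop: (acc, scount, l)
def stepInner (x : Int) (st : Int × Int × List Int) (y : Int) : Int × Int × List Int :=
  let v := x + y
  if 200 ≤ v then (st.1 + v, st.2.1 + 1, st.2.2) else (st.1, st.2.1, st.2.2 ++ [v])

-- one iteration of A's outer loop: memo entry for index i from the entries for i+1 … n-1
def stepA (x : Int) (prev : List (Int × List Int × Int)) : Int × List Int × Int :=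
  let st0 : Int × Int × List Int :=
    (if 200 ≤ x then x else 0, if 200 ≤ x then 1 else 0, if 200 ≤ x then [] else [x])
  let st := prev.foldl (fun st m => m.2.1.foldl (stepInner x) st) st0
  match prev with
  | [] => (st.1, st.2.2, st.2.1)
  | m1 :: _ =>
    if m1.1 > 0 then (st.1 + 2 * m1.1 + x * m1.2.2, st.2.2, st.2.1 + 2 * m1.2.2)
    else (st.1, st.2.2, st.2.1)

-- the memo list built from the right: memoFold fs = [memo[0], memo[1], …]
def memoFold : List Int → List (Int × List Int × Int)
  | [] => []
  | x :: s => stepA x (memoFold s) :: memoFold s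

def solve (fs : List Int) : Int := ((memoFold fs).headD (0, [], 0)).1

-- ===== PORT B =====
-- body of B's inner loop 'for s, c in cnt.items()' over state (nacc, nbcount, ncnt)
def bInner (x : Int) (st : Int × Int × PySem.Dict Int Int) (sc : Int × Int) :
    Int × Int × PySem.Dict Int Int :=
  let t := x + sc.1
  if 200 ≤ t then (st.1 + t * sc.2, st.2.1 + sc.2, st.2.2)
  else (st.1, st.2.1, st.2.2.insert t (st.2.2.getD t 0 + sc.2))

-- one iteration of B's single pass, state (acc, bcount, cnt)
def bStep (st : Int × Int × PySem.Dict Int Int) (x : Int) : Int × Int × PySem.Dict Int Int :=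
  let init : Int × Int × PySem.Dict Int Int :=
    if st.1 > 0 then (2 * st.1 + x * st.2.1, 2 * st.2.1, st.2.2) else (0, 0, st.2.2)
  let st2 := st.2.2.items.foldl (bInner x) init
  if 200 ≤ x then (st2.1 + x, st2.2.1 + 1, st2.2.2)
  else (st2.1, st2.2.1, st2.2.2.insert x (st2.2.2.getD x 0 + 1))

def solve_alt (fs : List Int) : Int :=
  (fs.reverse.foldl bStep (0, 0, PySem.Dict.empty)).1

-- ===== PRECONDITION & SPEC =====
-- Pre_ excludes only the empty list, on which A raises IndexError (memo[0] of an empty memo).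
def Pre_solve (fs : List Int) : Prop := fs ≠ []
instance (fs : List Int) : Decidable (Pre_solve fs) := by unfold Pre_solve; infer_instance
def pvWitness_solve : List Int := [100, 150, 60]

def Spec_solve (fs : List Int) (out : Int) : Prop := out = solve_alt fs
instance (fs : List Int) (out : Int) : Decidable (Spec_solve fs out) := by unfold Spec_solve; infer_instance

-- ===== CLAIM (what is proved, stated in full; the proofs are below) =====
def Claim_equal_solve : Prop := ∀ (fs : List Int), Dom_solve fs → Pre_solve fs → Spec_solve fs (solve fs)

-- ===== LEMMAS AND PROOFS =====

-- characterisation of A's inner double loop over one list of small sums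
lemma inner_char (x : Int) (L : List Int) (st : Int × Int × List Int) :
    L.foldl (stepInner x) st =
      (st.1 + ((L.map (fun y => x + y)).filter (fun v => 200 ≤ v)).sum,
       st.2.1 + (((L.map (fun y => x + y)).filter (fun v => 200 ≤ v)).length : Int),
       st.2.2 ++ (L.map (fun y => x + y)).filter (fun v => v < 200)) := by
  induction L generalizing st with
  | nil => simp
  | cons y L ih =>
    obtain ⟨a, b, c⟩ := st
    simp only [List.foldl_cons, List.map_cons, List.filter_cons]
    by_cases h : (200:Int) ≤ x + y
    · rw [show stepInner x (a, b, c) y = (a + (x + y), b + 1, c) by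
        simp [stepInner, h], ih]
      simp only [h, decide_true, if_pos, show ¬ (x + y < 200) by omega, decide_false,
        Bool.false_eq_true, if_neg, not_false_iff, List.sum_cons, List.length_cons]
      refine congrArg₂ _ (by ring) (congrArg₂ _ (by push_cast; ring) rfl)
    · rw [show stepInner x (a, b, c) y = (a, b, c ++ [x + y]) by
        simp [stepInner, h], ih]
      simp only [show ((x:Int) + y < 200) by omega, decide_true, if_pos, h, decide_false,
        Bool.false_eq_true, if_neg, not_false_iff, List.append_assoc, List.singleton_append]

lemma foldl_inner_eq (x : Int) (ls : List (Int × List Int × Int)) (st : Int × Int × List Int) :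
    ls.foldl (fun st m => m.2.1.foldl (stepInner x) st) st
      = (ls.flatMap (fun m => m.2.1)).foldl (stepInner x) st := by
  induction ls generalizing st with
  | nil => simp
  | cons m ls ih => simp [List.flatMap_cons, List.foldl_append, ih]

-- B applied from the right: structural companion of memoFold
def bFold : List Int → Int × Int × PySem.Dict Int Int
  | [] => (0, 0, PySem.Dict.empty)
  | x :: s => bStep (bFold s) x

lemma foldl_reverse_eq_bFold (fs : List Int) :
    fs.reverse.foldl bStep (0, 0, PySem.Dict.empty) = bFold fs := by
  induction fs with
  | nil => rfl
  | cons x s ih => simp [List.reverse_cons, List.foldl_append, ih, bFold]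

-- characterisation of B's inner loop over the counter's items
lemma bInner_fold (x : Int) (its : List (Int × Int)) :
    ∀ (a b : Int) (d : PySem.Dict Int Int),
      ((its.foldl (bInner x) (a, b, d)).1
        = a + (its.map (fun kc => (if 200 ≤ x + kc.1 then x + kc.1 else 0) * kc.2)).sum)
    ∧ ((its.foldl (bInner x) (a, b, d)).2.1
        = b + (its.map (fun kc => (if 200 ≤ x + kc.1 then 1 else 0) * kc.2)).sum)
    ∧ (d.keys.Nodup → (its.foldl (bInner x) (a, b, d)).2.2.keys.Nodup)
    ∧ (∀ m : Int, (its.foldl (bInner x) (a, b, d)).2.2.getD m 0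
        = d.getD m 0
          + (its.map (fun kc =>
              (if 200 ≤ x + kc.1 then 0 else if x + kc.1 = m then 1 else 0) * kc.2)).sum) := by
  induction its with
  | nil => intro a b d; simp
  | cons kc rest ih =>
    intro a b d
    by_cases h : (200:Int) ≤ x + kc.1
    · have hstep : bInner x (a, b, d) kc = (a + (x + kc.1) * kc.2, b + kc.2, d) := by
        simp [bInner, h]
      obtain ⟨i1, i2, i3, i4⟩ := ih (a + (x + kc.1) * kc.2) (b + kc.2) d
      refine ⟨?_, ?_, ?_, ?_⟩
      · simp only [List.foldl_cons, hstep, i1, List.map_cons, List.sum_cons, if_pos h]; ring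
      · simp only [List.foldl_cons, hstep, i2, List.map_cons, List.sum_cons, if_pos h]; ring
      · simpa only [List.foldl_cons, hstep] using i3
      · intro m
        simp only [List.foldl_cons, hstep, i4 m, List.map_cons, List.sum_cons, if_pos h]; ring
    · have hstep : bInner x (a, b, d) kc
          = (a, b, d.insert (x + kc.1) (d.getD (x + kc.1) 0 + kc.2)) := by
        simp [bInner, h]
      obtain ⟨i1, i2, i3, i4⟩ := ih a b (d.insert (x + kc.1) (d.getD (x + kc.1) 0 + kc.2))
      refine ⟨?_, ?_, ?_, ?_⟩
      · simp only [List.foldl_cons, hstep, i1, List.map_cons, List.sum_cons, if_neg h]; ring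
      · simp only [List.foldl_cons, hstep, i2, List.map_cons, List.sum_cons, if_neg h]; ring
      · intro hnd
        simp only [List.foldl_cons, hstep]
        exact i3 (PySem.Dict.nodup_keys_insert _ _ _ hnd)
      · intro m
        simp only [List.foldl_cons, hstep, i4 m, List.map_cons, List.sum_cons, if_neg h,
          PySem.Dict.getD_insert]
        by_cases hm : m = x + kc.1
        · rw [if_pos hm, if_pos hm.symm, hm]; ring
        · rw [if_neg hm, if_neg (fun hh => hm hh.symm)]; ring

-- lookup in a nodup-keyed item list as a filtered sum
lemma filter_items_getD_aux : ∀ (its : List (Int × Int)), (its.map Prod.fst).Nodup →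
    ∀ k : Int, ((its.filter (fun kc => kc.1 = k)).map Prod.snd).sum
      = (PySem.Dict.mk its).getD k 0 := by
  intro its
  induction its with
  | nil => intro _ k; simp [PySem.Dict.getD, PySem.Dict.get?]
  | cons kc rest ih =>
    intro hnd k
    simp only [List.map_cons, List.nodup_cons] at hnd
    rw [PySem.Dict.getD_eq_get?_getD, PySem.Dict.get?_mk_cons]
    by_cases h : kc.1 = k
    · have hrest : rest.filter (fun kc' => kc'.1 = k) = [] := by
        rw [List.filter_eq_nil_iff]
        intro p hp hpk
        simp only [decide_eq_true_eq] at hpk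
        exact hnd.1 (by rw [h, ← hpk]; exact List.mem_map_of_mem hp)
      rw [List.filter_cons, if_pos (by simpa using h), List.map_cons, List.sum_cons, hrest]
      simp [h]
    · have hne : (kc.1 == k) = false := by simpa using h
      rw [List.filter_cons, if_neg (by simpa using h)]
      simp only [hne, Bool.false_eq_true, if_neg, not_false_iff]
      simpa [PySem.Dict.getD_eq_get?_getD] using ih hnd.2 k

lemma filter_items_getD (d : PySem.Dict Int Int) (hnd : d.keys.Nodup) (k : Int) :
    ((d.items.filter (fun kc => kc.1 = k)).map Prod.snd).sum = d.getD k 0 :=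
  filter_items_getD_aux d.items hnd k

-- the weighted items sum of a counter equals the plain sum over the counted multiset
lemma list_sum_counts (f : Int → Int) : ∀ (its : List (Int × Int)) (L : List Int),
    (its.map Prod.fst).Nodup →
    (∀ k : Int, ((its.filter (fun kc => kc.1 = k)).map Prod.snd).sum = (L.count k : Int)) →
    (its.map (fun kc => f kc.1 * kc.2)).sum = (L.map f).sum := by
  intro its
  induction its with
  | nil =>
    intro L _ hc
    have hL : L = [] := by
      cases L with
      | nil => rfl
      | cons y L' =>
        have := hc y
        simp only [List.filter_nil, List.map_nil, List.sum_nil] at this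
        have hcount : (y :: L').count y ≠ 0 := by simp
        omega
    simp [hL]
  | cons kc rest ih =>
    intro L hnd hc
    simp only [List.map_cons, List.nodup_cons] at hnd
    have hrestnil : rest.filter (fun kc' => kc'.1 = kc.1) = [] := by
      rw [List.filter_eq_nil_iff]
      intro p hp hpk
      simp only [decide_eq_true_eq] at hpk
      exact hnd.1 (hpk ▸ List.mem_map_of_mem hp)
    have hkc : kc.2 = (L.count kc.1 : Int) := by
      have := hc kc.1
      rw [List.filter_cons, if_pos (by simp), hrestnil] at this
      simpa using this
    set L' := L.filter (fun y => !(y == kc.1)) with hL'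
    have hcrest : ∀ k : Int,
        ((rest.filter (fun kc' => kc'.1 = k)).map Prod.snd).sum = (L'.count k : Int) := by
      intro k
      by_cases hk : k = kc.1
      · rw [hk, hrestnil]
        have hz : L'.count kc.1 = 0 := by
          rw [hL', List.count_eq_zero]
          intro hmem
          have := List.of_mem_filter hmem
          simp at this
        rw [hz]
        simp
      · have := hc k
        rw [List.filter_cons, if_neg (by simp; exact fun hh => hk hh.symm)] at this
        rw [this, hL']
        congr 1
        rw [List.count_filter (by simp [hk])]
    have hperm : L.Perm (L.filter (fun y => y == kc.1) ++ L') :=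
      (List.filter_append_perm (fun y => y == kc.1) L).symm
    have hrepl : L.filter (fun y => y == kc.1) = List.replicate (L.count kc.1) kc.1 := by
      rw [List.filter_beq, List.count]
    have hsum : (L.map f).sum = (L.count kc.1 : Int) * f kc.1 + (L'.map f).sum := by
      rw [List.Perm.sum_eq (hperm.map f), List.map_append, List.sum_append, hrepl,
        List.map_replicate, List.sum_replicate, nsmul_eq_mul]
    rw [List.map_cons, List.sum_cons, ih L' hnd.2 hcrest, hsum, hkc]
    ring

-- sums over the filtered shifted list written as ite-sums over the plain list
lemma mapf_big_sum (x : Int) (L : List Int) :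
    (L.map (fun y => if 200 ≤ x + y then x + y else 0)).sum
      = ((L.map (fun y => x + y)).filter (fun v => 200 ≤ v)).sum := by
  induction L with
  | nil => simp
  | cons y L ih =>
    by_cases h : (200:Int) ≤ x + y
    · rw [List.map_cons, List.sum_cons, if_pos h, List.map_cons, List.filter_cons,
        if_pos (by simpa using h), List.sum_cons, ih]
    · rw [List.map_cons, List.sum_cons, if_neg h, List.map_cons, List.filter_cons,
        if_neg (by simpa using h), ih, zero_add]

lemma mapf_big_len (x : Int) (L : List Int) :
    (L.map (fun y => if 200 ≤ x + y then (1:Int) else 0)).sum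
      = (((L.map (fun y => x + y)).filter (fun v => 200 ≤ v)).length : Int) := by
  induction L with
  | nil => simp
  | cons y L ih =>
    by_cases h : (200:Int) ≤ x + y
    · rw [List.map_cons, List.sum_cons, if_pos h, List.map_cons, List.filter_cons,
        if_pos (by simpa using h), List.length_cons, ih]
      push_cast; ring
    · rw [List.map_cons, List.sum_cons, if_neg h, List.map_cons, List.filter_cons,
        if_neg (by simpa using h), ih, zero_add]

lemma mapf_small_count (x m : Int) (L : List Int) :
    (L.map (fun y => if 200 ≤ x + y then (0:Int) else if x + y = m then 1 else 0)).sum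
      = (((L.map (fun y => x + y)).filter (fun v => v < 200)).count m : Int) := by
  induction L with
  | nil => simp
  | cons y L ih =>
    by_cases h : (200:Int) ≤ x + y
    · rw [List.map_cons, List.sum_cons, if_pos h, List.map_cons, List.filter_cons]
      have hcond : ¬ decide (x + y < 200) = true := by
        simp only [decide_eq_true_eq]; omega
      rw [if_neg hcond, ih, zero_add]
    · rw [List.map_cons, List.sum_cons, if_neg h, List.map_cons, List.filter_cons]
      have hcond : decide (x + y < 200) = true := by
        simp only [decide_eq_true_eq]; omega
      rw [if_pos hcond, List.count_cons, ih]
      by_cases hm : x + y = m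
      · have hbeq : (x + y == m) = true := by simp [hm]
        rw [if_pos hm, if_pos hbeq]
        push_cast; ring
      · have hbeq : ¬ (x + y == m) = true := by
          simp only [beq_iff_eq]; exact hm
        rw [if_neg hm, if_neg hbeq]
        push_cast; ring

-- the main invariant: B's single-pass state mirrors the head of A's memo and its small lists
lemma main_inv (s : List Int) :
    ((bFold s).1 = ((memoFold s).headD (0, [], 0)).1)
  ∧ ((bFold s).2.1 = ((memoFold s).headD (0, [], 0)).2.2)
  ∧ ((bFold s).2.2.keys.Nodup)
  ∧ (∀ k : Int, (bFold s).2.2.getD k 0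
      = (((memoFold s).flatMap (fun m => m.2.1)).count k : Int)) := by
  induction s with
  | nil =>
    refine ⟨rfl, rfl, ?_, ?_⟩
    · show (PySem.Dict.empty : PySem.Dict Int Int).keys.Nodup
      simp [PySem.Dict.keys_empty]
    · intro k; simp [bFold, memoFold, PySem.Dict.getD_empty]
  | cons x s ih =>
    obtain ⟨ih1, ih2, ih3, ih4⟩ := ih
    set L : List Int := (memoFold s).flatMap (fun m => m.2.1) with hLdef
    set d : PySem.Dict Int Int := (bFold s).2.2 with hd
    set g1 : Int := (if (bFold s).1 > 0 then 2 * (bFold s).1 + x * (bFold s).2.1 else 0) with hg1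
    set g2 : Int := (if (bFold s).1 > 0 then 2 * (bFold s).2.1 else 0) with hg2
    set st2 := d.items.foldl (bInner x) (g1, g2, d) with hst2
    obtain ⟨f1, f2, f3, f4⟩ := bInner_fold x d.items g1 g2 d
    have hcounts : ∀ k : Int,
        ((d.items.filter (fun kc => kc.1 = k)).map Prod.snd).sum = (L.count k : Int) := by
      intro k
      rw [filter_items_getD _ ih3 k, ih4 k]
    have hS1 : (d.items.map
          (fun kc => (if 200 ≤ x + kc.1 then x + kc.1 else 0) * kc.2)).sum
        = ((L.map (fun y => x + y)).filter (fun v => 200 ≤ v)).sum := by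
      rw [list_sum_counts (fun k => if 200 ≤ x + k then x + k else 0) _ L ih3 hcounts,
        mapf_big_sum]
    have hS2 : (d.items.map
          (fun kc => (if 200 ≤ x + kc.1 then (1:Int) else 0) * kc.2)).sum
        = (((L.map (fun y => x + y)).filter (fun v => 200 ≤ v)).length : Int) := by
      rw [list_sum_counts (fun k => if 200 ≤ x + k then (1:Int) else 0) _ L ih3 hcounts,
        mapf_big_len]
    have hS3 : ∀ m : Int, (d.items.map
          (fun kc => (if 200 ≤ x + kc.1 then (0:Int) else if x + kc.1 = m then 1 else 0)
            * kc.2)).sum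
        = (((L.map (fun y => x + y)).filter (fun v => v < 200)).count m : Int) := by
      intro m
      rw [list_sum_counts (fun k => if 200 ≤ x + k then (0:Int) else if x + k = m then 1 else 0)
        _ L ih3 hcounts, mapf_small_count]
    have hgA1 : g1 = (if ((memoFold s).headD (0, [], 0)).1 > 0
        then 2 * ((memoFold s).headD (0, [], 0)).1 + x * ((memoFold s).headD (0, [], 0)).2.2
        else 0) := by rw [hg1, ih1, ih2]
    have hgA2 : g2 = (if ((memoFold s).headD (0, [], 0)).1 > 0
        then 2 * ((memoFold s).headD (0, [], 0)).2.2 else 0) := by rw [hg2, ih1, ih2]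
    -- A's head after one step, via the inner characterisation
    have hA : stepA x (memoFold s)
        = ((if 200 ≤ x then x else 0)
             + ((L.map (fun y => x + y)).filter (fun v => 200 ≤ v)).sum
             + (if ((memoFold s).headD (0, [], 0)).1 > 0
                 then 2 * ((memoFold s).headD (0, [], 0)).1
                      + x * ((memoFold s).headD (0, [], 0)).2.2
                 else 0),
           (if 200 ≤ x then [] else [x])
             ++ (L.map (fun y => x + y)).filter (fun v => v < 200),
           (if 200 ≤ x then 1 else 0)
             + (((L.map (fun y => x + y)).filter (fun v => 200 ≤ v)).length : Int)
             + (if ((memoFold s).headD (0, [], 0)).1 > 0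
                 then 2 * ((memoFold s).headD (0, [], 0)).2.2
                 else 0)) := by
      rcases hmf : memoFold s with _ | ⟨m1, rest⟩
      · have hL0 : L = [] := by rw [hLdef, hmf]; rfl
        simp only [stepA, List.foldl_nil, List.headD_nil, hL0]
        simp
      · have hL2 : (m1 :: rest).flatMap (fun m => m.2.1) = L := by rw [hLdef, hmf]
        simp only [stepA, List.headD_cons]
        rw [foldl_inner_eq, hL2, inner_char]
        by_cases hpos : m1.1 > 0
        · simp only [if_pos hpos]
          exact Prod.ext (by ring) (Prod.ext rfl (by ring))
        · simp only [if_neg hpos]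
          exact Prod.ext (by ring) (Prod.ext rfl (by ring))
    have hA1 : (stepA x (memoFold s)).1
        = (if 200 ≤ x then x else 0)
          + ((L.map (fun y => x + y)).filter (fun v => 200 ≤ v)).sum
          + (if ((memoFold s).headD (0, [], 0)).1 > 0
              then 2 * ((memoFold s).headD (0, [], 0)).1
                   + x * ((memoFold s).headD (0, [], 0)).2.2
              else 0) := by rw [hA]
    have hAl : (stepA x (memoFold s)).2.1
        = (if 200 ≤ x then [] else [x])
          ++ (L.map (fun y => x + y)).filter (fun v => v < 200) := by rw [hA]
    have hA2 : (stepA x (memoFold s)).2.2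
        = (if 200 ≤ x then 1 else 0)
          + (((L.map (fun y => x + y)).filter (fun v => 200 ≤ v)).length : Int)
          + (if ((memoFold s).headD (0, [], 0)).1 > 0
              then 2 * ((memoFold s).headD (0, [], 0)).2.2
              else 0) := by rw [hA]
    have hinit : (if (bFold s).1 > 0
          then ((2 * (bFold s).1 + x * (bFold s).2.1 : Int), (2 * (bFold s).2.1 : Int), d)
          else ((0:Int), (0:Int), d))
        = (g1, g2, d) := by
      rw [hg1, hg2]; split_ifs <;> rfl
    have hBstep : bFold (x :: s)
        = (if 200 ≤ x then (st2.1 + x, st2.2.1 + 1, st2.2.2)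
            else (st2.1, st2.2.1, st2.2.2.insert x (st2.2.2.getD x 0 + 1))) := by
      show bStep (bFold s) x = _
      simp only [bStep, ← hd]
      rw [hinit, ← hst2]
    have hMdef : memoFold (x :: s) = stepA x (memoFold s) :: memoFold s := rfl
    refine ⟨?_, ?_, ?_, ?_⟩
    · rw [hBstep, hMdef, List.headD_cons]
      by_cases hx : (200:Int) ≤ x
      · rw [if_pos hx]
        show st2.1 + x = _
        rw [hA1, f1, hS1, hgA1, if_pos hx]
        ring
      · rw [if_neg hx]
        show st2.1 = _
        rw [hA1, f1, hS1, hgA1, if_neg hx]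
        ring
    · rw [hBstep, hMdef, List.headD_cons]
      by_cases hx : (200:Int) ≤ x
      · rw [if_pos hx]
        show st2.2.1 + 1 = _
        rw [hA2, f2, hS2, hgA2, if_pos hx]
        ring
      · rw [if_neg hx]
        show st2.2.1 = _
        rw [hA2, f2, hS2, hgA2, if_neg hx]
        ring
    · rw [hBstep]
      by_cases hx : (200:Int) ≤ x
      · rw [if_pos hx]
        exact f3 ih3
      · rw [if_neg hx]
        exact PySem.Dict.nodup_keys_insert _ _ _ (f3 ih3)
    · intro k
      rw [hBstep, hMdef, List.flatMap_cons, hAl]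
      by_cases hx : (200:Int) ≤ x
      · rw [if_pos hx]
        show st2.2.2.getD k 0 = _
        rw [← hLdef, f4 k, ih4 k, hS3 k, if_pos hx, List.nil_append, List.count_append]
        push_cast
        ring
      · rw [if_neg hx]
        show (st2.2.2.insert x (st2.2.2.getD x 0 + 1)).getD k 0 = _
        rw [PySem.Dict.getD_insert, if_neg hx, ← hLdef]
        have hcnt : ([x] ++ (L.map (fun y => x + y)).filter (fun v => v < 200)
              ++ L).count k
            = ((if k = x then 1 else 0) : Nat)
              + ((L.map (fun y => x + y)).filter (fun v => v < 200)).count k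
              + L.count k := by
          rw [List.count_append, List.count_append]
          by_cases hk : k = x
          · rw [if_pos hk, hk]; simp [Nat.add_assoc]
          · rw [if_neg hk]
            have hb : (x == k) = false := by
              simp only [beq_eq_false_iff_ne, ne_eq]; exact fun h => hk h.symm
            simp [List.count_cons, hb]
        rw [hcnt]
        by_cases hk : k = x
        · rw [if_pos hk, if_pos hk, hk, f4 x, ih4 x, hS3 x]
          push_cast
          ring
        · rw [if_neg hk, if_neg hk, f4 k, ih4 k, hS3 k]
          push_cast
          ring

-- ===== VERDICT (by name: the statement is the Claim_ definition above) =====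
theorem solve_spec : Claim_equal_solve := by
  intro fs _ _
  show solve fs = solve_alt fs
  rw [solve_alt, foldl_reverse_eq_bFold, solve, (main_inv fs).1]
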